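-- pv_equiv track=rewrite | github.com/denis-verkholantsev/FSM | substring_search/substr_search.py | processing_string
-- ===== SOURCE A (Python) =====
-- def check_repeated_characters(substr):
--     for i in range(1, len(substr), 1):
--         if substr[i] != substr[i-1]:
--             return False
--     return True
--
-- def processing_string(substr):
--     if substr == '':
--         return True
--     # Разбиваем подстроки вида '+...+' на подстроки, разделенные '-'
--     splitted_substring = substr.split('-')
--     # Храним символы подстрок, разбитых '-', для проверки на то, чтобы символы до и после '-' не были одинаковыми
--     character_of_splitted_substr = []
--     # Проверяем на соответсиве условию все подстроки, разбитые '-'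
--     for i in range(len(splitted_substring)):
--         if splitted_substring[i] == '':
--             return False
--         # Проверяем, чтобы символы в подстроке вида '-...-' были одинаковыми
--         if check_repeated_characters(splitted_substring[i]):
--             character_of_splitted_substr.append(splitted_substring[i][0])
--         else:
--             return False
--         # Проверяем, чтобы символы до '-' и после не были одинаковыми
--         if i > 0:
--             if character_of_splitted_substr[i] == character_of_splitted_substr[i-1]:
--                 return False
--     return True
-- ===== SOURCE B (Python) =====
-- def processing_string(substr):
--     if substr == '':
--         return True
--     seg_char = None        # char of the segment being read, None at a boundary
--     prev_seg_char = None   # char of the last completed segment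
--     for c in substr:
--         if c == '-':
--             if seg_char is None:
--                 return False
--             prev_seg_char = seg_char
--             seg_char = None
--         elif seg_char is None:
--             if c == prev_seg_char:
--                 return False
--             seg_char = c
--         elif c != seg_char:
--             return False
--     return seg_char is not None
-- ===== Notes on version B (the rewrite author's own statement) =====
-- stated objective: faster
-- what changed: Replaced split('-') plus a per-segment repeated-character helper and a collected-chars list by a single character-by-character pass maintaining the current and previous segment characters.
import Mathlib
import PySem

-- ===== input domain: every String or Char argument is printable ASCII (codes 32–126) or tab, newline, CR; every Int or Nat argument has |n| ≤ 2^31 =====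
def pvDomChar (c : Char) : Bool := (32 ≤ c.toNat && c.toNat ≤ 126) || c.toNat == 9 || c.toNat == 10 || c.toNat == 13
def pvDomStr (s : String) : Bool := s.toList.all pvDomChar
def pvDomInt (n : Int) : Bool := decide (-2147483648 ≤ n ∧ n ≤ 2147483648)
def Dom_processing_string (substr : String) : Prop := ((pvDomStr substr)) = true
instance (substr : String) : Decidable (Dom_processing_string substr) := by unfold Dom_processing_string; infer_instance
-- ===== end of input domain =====

-- B replaces split('-') + a repeated-character helper by one character-by-character pass (objective: faster, constant-factor).


-- ===== PORT A =====
-- check_repeated_characters: adjacent-pair scan, exactly as the Python loop over range(1, len)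
def checkRepeated : List Char → Bool
  | [] => true
  | [_] => true
  | a :: b :: rest => if b ≠ a then false else checkRepeated (b :: rest)

-- A's loop over the split segments; `prev` is the last element of character_of_splitted_substr
def goA : List (List Char) → Option Char → Bool
  | [], _ => true
  | seg :: rest, prev =>
    match seg with
    | [] => false
    | c :: cs =>
      if checkRepeated (c :: cs) then
        match prev with
        | some p => if c = p then false else goA rest (some c)
        | none => goA rest (some c)
      else false

def processing_string (substr : String) : Bool :=
  if substr.toList = [] then true
  else goA (PySem.Chars.splitOn substr.toList ['-']) none

-- ===== PORT B =====
def goB : List Char → Option Char → Option Char → Bool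
  | [], seg, _ => seg.isSome
  | c :: rest, seg, prev =>
    if c = '-' then
      match seg with
      | none => false
      | some s => goB rest none (some s)
    else
      match seg with
      | none => if some c = prev then false else goB rest (some c) prev
      | some s => if c ≠ s then false else goB rest (some s) prev

def processing_string_alt (substr : String) : Bool :=
  if substr.toList = [] then true
  else goB substr.toList none none

-- ===== PRECONDITION & SPEC =====
def Spec_processing_string (substr : String) (out : Bool) : Prop := out = processing_string_alt substr
instance (substr : String) (out : Bool) : Decidable (Spec_processing_string substr out) := by unfold Spec_processing_string; infer_instance

-- ===== CLAIM (what is proved, stated in full; the proofs are below) =====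
def Claim_equal_processing_string : Prop := ∀ (substr : String), Dom_processing_string substr → Spec_processing_string substr (processing_string substr)

-- ===== LEMMAS AND PROOFS =====

-- structural reading of split('-')
def mysplit : List Char → List (List Char)
  | [] => [[]]
  | c :: rest =>
    if c = '-' then [] :: mysplit rest
    else
      match mysplit rest with
      | [] => [[c]]   -- unreachable
      | h :: t => (c :: h) :: t

lemma mysplit_ne_nil (l : List Char) : mysplit l ≠ [] := by
  cases l with
  | nil => simp [mysplit]
  | cons c rest =>
    simp only [mysplit]
    split
    · simp
    · split <;> simp

-- prepend xs onto the first piece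
def consFirst (xs : List Char) : List (List Char) → List (List Char)
  | [] => [xs]
  | h :: t => (xs ++ h) :: t

lemma consFirst_nil_of_ne_nil {m : List (List Char)} (h : m ≠ []) : consFirst [] m = m := by
  cases m with
  | nil => exact absurd rfl h
  | cons a t => simp [consFirst]

lemma consFirst_consFirst (xs ys : List Char) (m : List (List Char)) :
    consFirst xs (consFirst ys m) = consFirst (xs ++ ys) m := by
  cases m <;> simp [consFirst]

lemma splitOn_go_eq (fuel : Nat) (l cur : List Char) (acc : List (List Char))
    (h : l.length ≤ fuel) :
    PySem.Chars.splitOn.go ['-'] fuel l cur acc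
      = acc.reverse ++ consFirst cur.reverse (mysplit l) := by
  induction fuel generalizing l cur acc with
  | zero =>
    have : l = [] := List.length_eq_zero_iff.mp (Nat.le_zero.mp h)
    subst this
    simp [PySem.Chars.splitOn.go, mysplit, consFirst]
  | succ n ih =>
    cases l with
    | nil => simp [PySem.Chars.splitOn.go, mysplit, consFirst]
    | cons c rest =>
      by_cases hc : c = '-'
      · subst hc
        have hpre : List.isPrefixOf ['-'] ('-' :: rest) = true := by
          simp [List.isPrefixOf]
        rw [PySem.Chars.splitOn.go]
        simp only [hpre, if_true, List.length_cons, List.length_nil, List.drop_succ_cons, List.drop_zero]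
        rw [ih rest [] (cur.reverse :: acc) (by simpa using Nat.lt_succ_iff.mp (by simpa using h))]
        simp only [mysplit, if_true, consFirst]
        cases hm : mysplit rest with
        | nil => exact absurd hm (mysplit_ne_nil rest)
        | cons a t => simp
      · have hpre : List.isPrefixOf ['-'] (c :: rest) = false := by
          simp [List.isPrefixOf]
          intro hx; exact absurd hx.symm hc
        rw [PySem.Chars.splitOn.go]
        simp only [hpre, Bool.false_eq_true, if_false]
        rw [ih rest (c :: cur) acc (by simpa using Nat.lt_succ_iff.mp (by simpa using h))]
        have : mysplit (c :: rest) = consFirst [c] (mysplit rest) := by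
          simp only [mysplit, hc, if_false]
          cases hm : mysplit rest with
          | nil => exact absurd hm (mysplit_ne_nil rest)
          | cons a t => simp [consFirst]
        rw [this, consFirst_consFirst]
        simp

lemma splitOn_eq_mysplit (l : List Char) :
    PySem.Chars.splitOn l ['-'] = mysplit l := by
  show PySem.Chars.splitOn.go ['-'] (l.length + 1) l [] [] = mysplit l
  rw [splitOn_go_eq (l.length + 1) l [] [] (Nat.le_succ _)]
  simp [consFirst_nil_of_ne_nil (mysplit_ne_nil l)]

lemma goA_dup (s : Char) (h : List Char) (t : List (List Char)) (prev : Option Char) :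
    goA ((s :: s :: h) :: t) prev = goA ((s :: h) :: t) prev := by
  simp [goA, checkRepeated]

-- the main invariant: P1 ∧ P2
lemma key (l : List Char) :
    (∀ prev, goA (mysplit l) prev = goB l none prev)
    ∧ (∀ s prev, prev ≠ some s → goA (consFirst [s] (mysplit l)) prev = goB l (some s) prev) := by
  induction l with
  | nil =>
    constructor
    · intro prev; simp [mysplit, goA, goB]
    · intro s prev hne
      cases prev with
      | none => simp [mysplit, consFirst, goA, checkRepeated, goB]
      | some p =>
        have : s ≠ p := fun h => hne (by rw [h])
        simp [mysplit, consFirst, goA, checkRepeated, goB, this]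
  | cons c rest ih =>
    obtain ⟨ih1, ih2⟩ := ih
    have hsplit_dash : c = '-' → mysplit (c :: rest) = [] :: mysplit rest := by
      intro hc; simp [mysplit, hc]
    have hsplit_nodash : c ≠ '-' → mysplit (c :: rest) = consFirst [c] (mysplit rest) := by
      intro hc
      simp only [mysplit, hc, if_false]
      cases hm : mysplit rest with
      | nil => exact absurd hm (mysplit_ne_nil rest)
      | cons a t => simp [consFirst]
    constructor
    · intro prev
      by_cases hc : c = '-'
      · subst hc
        rw [hsplit_dash rfl]
        simp [goA, goB]
      · rw [hsplit_nodash hc]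
        simp only [goB, hc, if_false]
        by_cases hp : some c = prev
        · subst hp
          simp only [if_true]
          cases hm : mysplit rest with
          | nil => exact absurd hm (mysplit_ne_nil rest)
          | cons a t =>
            simp only [consFirst]
            by_cases hrep : checkRepeated (c :: a) = true
            · simp [goA, hrep]
            · simp [goA, hrep]
        · simp only [hp, if_false]
          exact ih2 c prev (fun h => hp h.symm)
    · intro s prev hne
      by_cases hc : c = '-'
      · subst hc
        rw [hsplit_dash rfl]
        -- consFirst [s] ([] :: mysplit rest) = [s] :: mysplit rest
        have : consFirst [s] ([] :: mysplit rest) = [s] :: mysplit rest := by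
          simp [consFirst]
        rw [this]
        have hgoB : goB ('-' :: rest) (some s) prev = goB rest none (some s) := by
          simp [goB]
        rw [hgoB]
        cases prev with
        | none => simpa [goA, checkRepeated] using ih1 (some s)
        | some p =>
          have hsp : s ≠ p := fun h => hne (by rw [h])
          simpa [goA, checkRepeated, hsp] using ih1 (some s)
      · -- c ≠ '-'
        rw [hsplit_nodash hc, consFirst_consFirst]
        have hgoB : goB (c :: rest) (some s) prev
            = if c ≠ s then false else goB rest (some s) prev := by
          simp [goB, hc]
        rw [hgoB]
        by_cases hcs : c = s
        · subst hcs
          simp only [ne_eq, not_true_eq_false, if_false]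
          have : ([c] ++ [c] : List Char) = [c, c] := rfl
          rw [this]
          -- consFirst [c,c] m : (c::c::h)::t ; use goA_dup
          cases hm : mysplit rest with
          | nil => exact absurd hm (mysplit_ne_nil rest)
          | cons a t =>
            have h1 : consFirst [c, c] (a :: t) = (c :: c :: a) :: t := by simp [consFirst]
            have h2 : consFirst [c] (a :: t) = (c :: a) :: t := by simp [consFirst]
            rw [h1, goA_dup, ← h2, ← hm]
            exact ih2 c prev hne
        · have : c ≠ s := hcs
          simp only [this, ne_eq, not_false_eq_true, if_true]
          -- goA on a segment starting c::s::… : checkRepeated fails at the first pair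
          cases hm : mysplit rest with
          | nil => exact absurd hm (mysplit_ne_nil rest)
          | cons a t =>
            have h1 : consFirst ([s] ++ [c]) (a :: t) = (s :: c :: a) :: t := by simp [consFirst]
            rw [h1]
            simp [goA, checkRepeated, hcs]

-- ===== VERDICT (by name: the statement is the Claim_ definition above) =====
theorem processing_string_spec : Claim_equal_processing_string := by
  intro substr _
  unfold Spec_processing_string processing_string processing_string_alt
  by_cases h : substr.toList = []
  · simp [h]
  · simp only [h, if_false]
    rw [splitOn_eq_mysplit]
    exact (key substr.toList).1 none
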